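-- pv_equiv track=rewrite | github.com/dtentiion/MCLCE-iOS | scripts/dump-swf-tags.py | read_ub
-- ===== SOURCE A (Python) =====
-- def read_ub(buf, bit_offset, nbits):
--     value = 0
--     for _ in range(nbits):
--         byte_index = bit_offset >> 3
--         bit_index = 7 - (bit_offset & 7)
--         value = (value << 1) | ((buf[byte_index] >> bit_index) & 1)
--         bit_offset += 1
--     return value, bit_offset
-- ===== SOURCE B (Python) =====
-- def read_ub(buf, bit_offset, nbits):
--     # Byte-at-a-time: accumulate the touched bytes, then shift & mask once.
--     if nbits <= 0:
--         return 0, bit_offset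
--     end = bit_offset + nbits
--     first = bit_offset >> 3
--     last = (end - 1) >> 3
--     acc = 0
--     for i in range(first, last + 1):
--         acc = (acc << 8) | (buf[i] & 0xFF)
--     value = (acc >> ((last + 1) * 8 - end)) & ((1 << nbits) - 1)
--     return value, end
-- ===== Notes on version B (the rewrite author's own statement) =====
-- stated objective: faster
-- what changed: B replaces A's one-iteration-per-bit loop (shifting the accumulator and extracting one bit per step) by a single pass over the touched byte range that concatenates the bytes into one accumulator and then extracts the whole field with one shift and one mask.
import Mathlib
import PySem

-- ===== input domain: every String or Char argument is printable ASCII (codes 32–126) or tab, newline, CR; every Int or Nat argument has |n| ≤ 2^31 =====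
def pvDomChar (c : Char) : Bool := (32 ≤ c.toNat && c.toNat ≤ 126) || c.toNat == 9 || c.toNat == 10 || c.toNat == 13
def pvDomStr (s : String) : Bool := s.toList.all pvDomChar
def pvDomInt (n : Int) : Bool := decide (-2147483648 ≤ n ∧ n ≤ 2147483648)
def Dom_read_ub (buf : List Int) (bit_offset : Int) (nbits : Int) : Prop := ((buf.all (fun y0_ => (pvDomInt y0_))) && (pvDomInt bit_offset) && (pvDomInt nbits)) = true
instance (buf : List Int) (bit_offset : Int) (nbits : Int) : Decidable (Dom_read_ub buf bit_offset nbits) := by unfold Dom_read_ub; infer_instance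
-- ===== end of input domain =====

-- B reads the touched bytes once and extracts the field with one shift and mask,
-- instead of A's one-loop-iteration-per-bit; objective: simpler/faster per-byte loop.

-- ===== PORT A =====
-- buf[byte_index] is PySem.List.pyGet?; Pre_ excludes the IndexError case (none), so .getD 0 is exact there.
-- bit_index = 7 - (bit_offset & 7) lies in [0,7], so .toNat is exact as a shift amount.
def read_ub (buf : List Int) (bit_offset : Int) (nbits : Int) : Int × Int :=
  (PySem.List.pyRange 0 nbits 1).foldl
    (fun st _ =>
      let byte_index := st.2 >>> (3 : Nat)
      let bit_index := 7 - PySem.Int.band st.2 7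
      (PySem.Int.bor (st.1 <<< (1 : Nat))
        (PySem.Int.band (((PySem.List.pyGet? buf byte_index).getD 0) >>> bit_index.toNat) 1),
       st.2 + 1))
    (0, bit_offset)

-- ===== PORT B =====
-- same conventions: pyGet? + getD 0 under Pre_; the two shift amounts are ≥ 0, so .toNat is exact.
def read_ub_alt (buf : List Int) (bit_offset : Int) (nbits : Int) : Int × Int :=
  if nbits ≤ 0 then (0, bit_offset)
  else
    let e := bit_offset + nbits
    let first := bit_offset >>> (3 : Nat)
    let last := (e - 1) >>> (3 : Nat)
    let acc := (PySem.List.pyRange first (last + 1) 1).foldl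
      (fun acc i => PySem.Int.bor (acc <<< (8 : Nat))
        (PySem.Int.band ((PySem.List.pyGet? buf i).getD 0) 255)) 0
    (PySem.Int.band (acc >>> ((last + 1) * 8 - e).toNat) ((1 <<< nbits.toNat) - 1), e)

-- ===== PRECONDITION & SPEC =====
-- Pre_ excludes exactly the inputs where A raises IndexError: some touched byte index
-- (they form the contiguous range bit_offset>>3 .. (bit_offset+nbits-1)>>3) is outside
-- Python's valid index range [-len(buf), len(buf)).
def Pre_read_ub (buf : List Int) (bit_offset : Int) (nbits : Int) : Prop :=
  nbits ≤ 0 ∨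
    (-(buf.length : Int) ≤ bit_offset >>> (3 : Nat) ∧
      (bit_offset + nbits - 1) >>> (3 : Nat) < (buf.length : Int))
instance (buf : List Int) (bit_offset : Int) (nbits : Int) : Decidable (Pre_read_ub buf bit_offset nbits) := by unfold Pre_read_ub; infer_instance
def pvWitness_read_ub : List Int × Int × Int := ([171, 205, 239], 3, 11)

def Spec_read_ub (buf : List Int) (bit_offset : Int) (nbits : Int) (out : Int × Int) : Prop := out = read_ub_alt buf bit_offset nbits
instance (buf : List Int) (bit_offset : Int) (nbits : Int) (out : Int × Int) : Decidable (Spec_read_ub buf bit_offset nbits out) := by unfold Spec_read_ub; infer_instance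

-- ===== CLAIM (what is proved, stated in full; the proofs are below) =====
def Claim_equal_read_ub : Prop := ∀ (buf : List Int) (bit_offset : Int) (nbits : Int), Dom_read_ub buf bit_offset nbits → Pre_read_ub buf bit_offset nbits → Spec_read_ub buf bit_offset nbits (read_ub buf bit_offset nbits)
-- ===== LEMMAS AND PROOFS =====


theorem pvToNatTestBit (m k : Nat) : (m.testBit k).toNat = m / 2 ^ k % 2 := by
  rw [Nat.testBit_eq_decide_div_mod_eq]
  rcases Nat.mod_two_eq_zero_or_one (m / 2 ^ k) with h | h <;> simp [h]

theorem pvBandMask (a : Int) (k : Nat) : PySem.Int.band a (2 ^ k - 1) = a % (2 ^ k) := by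
  have h1 : (1:Nat) ≤ 2 ^ k := Nat.one_le_two_pow
  have hm : ((2:Int) ^ k - 1) = ((2 ^ k - 1 : Nat) : Int) := by push_cast [h1]; ring
  by_cases ha : 0 ≤ a
  · rw [hm, PySem.Int.band_of_nonneg ha (by exact_mod_cast Int.natCast_nonneg _),
      Int.toNat_natCast, Nat.and_two_pow_sub_one_eq_mod]
    rw [show a = ((a.toNat : Nat) : Int) by omega]
    push_cast
    rw [Int.toNat_natCast]
  · unfold PySem.Int.band
    rw [if_neg (by omega), if_pos (by rw [hm]; exact Int.natCast_nonneg _)]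
    have hb : ((2:Int) ^ k - 1).toNat = 2 ^ k - 1 := by
      rw [hm, Int.toNat_natCast]
    rw [hb, Nat.and_comm, Nat.and_two_pow_sub_one_eq_mod]
    set n := (-a - 1).toNat with hn
    have hna : (n : Int) = -a - 1 := by omega
    have hr : n % 2 ^ k < 2 ^ k := Nat.mod_lt _ (by omega)
    have hq' : (2 ^ k : Int) * ↑(n / 2 ^ k) + ↑(n % 2 ^ k) = ↑n := by
      exact_mod_cast Nat.div_add_mod n (2 ^ k)
    have key : a = ((2 ^ k - 1 - n % 2 ^ k : Nat) : Int) + 2 ^ k * (-(↑(n / 2 ^ k) : Int) - 1) := by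
      have hp : ((2 ^ k : Nat) : Int) = 2 ^ k := by push_cast; rfl
      rw [Nat.cast_sub (by omega), Nat.cast_sub (by omega), hp, Nat.cast_one]
      linarith [hq', hna]
    rw [key, Int.add_mul_emod_self_left,
      Int.emod_eq_of_lt (Int.natCast_nonneg _) (by exact_mod_cast (by omega : (2 ^ k - 1 - n % 2 ^ k : Nat) < 2 ^ k))]

theorem pvOrDisjoint (k a b : Nat) (h : b < 2 ^ k) : (a <<< k) ||| b = a * 2 ^ k + b := by
  induction k generalizing b with
  | zero =>
    have : b = 0 := by omega
    subst this; simp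
  | succ k ih =>
    have hb : b / 2 < 2 ^ k := by omega
    have h2 : a <<< (k + 1) = Nat.bit false (a <<< k) := by
      simp [Nat.bit_val, Nat.shiftLeft_succ, Nat.mul_comm]
    have h3 : b = Nat.bit (b.testBit 0) (b >>> 1) := (Nat.bit_testBit_zero_shiftRight_one b).symm
    rw [h2]
    nth_rewrite 1 [h3]
    rw [Nat.lor_bit]
    have h4 : b >>> 1 = b / 2 := by simp [Nat.shiftRight_succ, Nat.shiftRight_zero]
    rw [Nat.bit_val, h4, ih _ hb]
    have h5 : (b.testBit 0).toNat = b % 2 := by simpa using pvToNatTestBit b 0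
    simp only [Bool.false_or, h5]
    ring_nf
    omega

theorem pvBorAdd (a b : Int) (k : Nat) (ha : 0 ≤ a) (hb : 0 ≤ b) (h : b < 2 ^ k) :
    PySem.Int.bor (a <<< k) b = a * 2 ^ k + b := by
  have hp : ((2 ^ k : Nat) : Int) = 2 ^ k := by push_cast; rfl
  rw [Int.shiftLeft_eq]
  rw [show a = ((a.toNat : Nat) : Int) by omega, show b = ((b.toNat : Nat) : Int) by omega]
  rw [show ((a.toNat : Int) * 2 ^ k) = ((a.toNat <<< k : Nat) : Int) by
    rw [Nat.shiftLeft_eq]; push_cast; ring]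
  rw [PySem.Int.bor_of_nonneg (Int.natCast_nonneg _) (Int.natCast_nonneg _),
    Int.toNat_natCast, Int.toNat_natCast, pvOrDisjoint k a.toNat b.toNat (by omega)]
  push_cast [Nat.shiftLeft_eq]; ring

theorem pvBitVal (x : Int) (k : Nat) (hk : k ≤ 7) :
    (x >>> k) % 2 = (((x % 256).toNat.testBit k).toNat : Int) := by
  rw [Int.shiftRight_eq_div_pow, pvToNatTestBit]
  have hm : (((x % 256).toNat : Nat) : Int) = x % 256 := by omega
  interval_cases k <;> · push_cast; omega

def pvByte (buf : List Int) (i : Int) : Nat := (((PySem.List.pyGet? buf i).getD 0) % 256).toNat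
def pvBit (buf : List Int) (p : Int) : Bool := (pvByte buf (p / 8)).testBit (7 - p % 8).toNat
def pvValA (buf : List Int) (o : Int) : Nat → Nat
  | 0 => 0
  | n + 1 => Nat.bit (pvBit buf (o + n)) (pvValA buf o n)
def pvAcc (l : List Nat) : Nat := l.foldl (fun a b => a * 256 + b) 0


theorem pvByte_lt (buf : List Int) (i : Int) : pvByte buf i < 256 := by
  unfold pvByte
  have h1 := Int.emod_nonneg ((PySem.List.pyGet? buf i).getD 0) (by norm_num : (256:Int) ≠ 0)
  have h2 := Int.emod_lt_of_pos ((PySem.List.pyGet? buf i).getD 0) (by norm_num : (0:Int) < 256)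
  omega

theorem pvReadA (buf : List Int) (o nb : Int) :
    read_ub buf o nb = (↑(pvValA buf o nb.toNat), o + nb.toNat) := by
  unfold read_ub
  rw [List.foldl_const, PySem.List.length_pyRange_one, Int.sub_zero]
  generalize nb.toNat = m
  induction m with
  | zero => simp [pvValA]
  | succ m ih =>
    rw [Function.iterate_succ_apply', ih]
    dsimp only
    have hsh : (o + (m:Int)) >>> (3:Nat) = (o + m) / 8 := by
      rw [Int.shiftRight_eq_div_pow]; norm_num
    have hb7 : PySem.Int.band (o + (m:Int)) 7 = (o + m) % 8 := by
      have := pvBandMask (o + (m:Int)) 3; norm_num at this; exact this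
    rw [hsh, hb7]
    set p : Int := o + m with hp
    set b0 : Int := (PySem.List.pyGet? buf (p / 8)).getD 0 with hb0
    have hk : (7 - p % 8).toNat ≤ 7 := by omega
    have hband1 : PySem.Int.band (b0 >>> (7 - p % 8).toNat) 1 = (b0 >>> (7 - p % 8).toNat) % 2 := by
      rw [PySem.Int.band_one, PySem.Int.mod_eq_emod_of_pos (by norm_num)]
    rw [hband1, pvBitVal b0 _ hk]
    have hbor := pvBorAdd (↑(pvValA buf o m)) (((b0 % 256).toNat.testBit (7 - p % 8).toNat).toNat : Int)
      1 (Int.natCast_nonneg _) (Int.natCast_nonneg _)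
      (by cases ((b0 % 256).toNat.testBit (7 - p % 8).toNat) <;> norm_num)
    rw [hbor, Prod.mk.injEq]
    refine ⟨?_, by rw [hp]; push_cast; ring⟩
    have h1 : pvValA buf o (m + 1) = Nat.bit (pvBit buf p) (pvValA buf o m) := by rw [hp]; rfl
    have h2 : pvBit buf p = (b0 % 256).toNat.testBit (7 - p % 8).toNat := rfl
    rw [h1, Nat.bit_val, h2]
    push_cast
    ring

theorem pvTestBitValA (buf : List Int) (o : Int) (n j : Nat) :
    (pvValA buf o n).testBit j = (decide (j < n) && pvBit buf (o + ((n - 1 - j : Nat) : Int))) := by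
  induction n generalizing j with
  | zero => simp [pvValA, Nat.zero_testBit]
  | succ n ih =>
    show (Nat.bit (pvBit buf (o + n)) (pvValA buf o n)).testBit j = _
    cases j with
    | zero => simp
    | succ j =>
      rw [Nat.testBit_bit_succ, ih j]
      have h1 : (n + 1 - 1 - (j + 1)) = (n - 1 - j) := by omega
      rw [h1]
      by_cases hj : j < n <;> simp [hj]

theorem pvAccCast (buf : List Int) (l : List Int) (a : Nat) :
    l.foldl (fun acc i => PySem.Int.bor (acc <<< (8 : Nat))
        (PySem.Int.band ((PySem.List.pyGet? buf i).getD 0) 255)) (a : Int)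
      = ↑(l.foldl (fun acc i => acc * 256 + pvByte buf i) a) := by
  induction l generalizing a with
  | nil => simp
  | cons i l ih =>
    rw [List.foldl_cons, List.foldl_cons]
    have hband : PySem.Int.band ((PySem.List.pyGet? buf i).getD 0) 255
        = ((pvByte buf i : Nat) : Int) := by
      have := pvBandMask ((PySem.List.pyGet? buf i).getD 0) 8
      norm_num at this
      rw [this]
      unfold pvByte
      have := Int.emod_nonneg ((PySem.List.pyGet? buf i).getD 0) (by norm_num : (256:Int) ≠ 0)
      omega
    have hbor := pvBorAdd ((a : Nat) : Int) ((pvByte buf i : Nat) : Int) 8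
      (Int.natCast_nonneg _) (Int.natCast_nonneg _)
      (by have := pvByte_lt buf i; push_cast; omega)
    rw [hband, hbor, show ((a:Int) * 2 ^ 8 + ↑(pvByte buf i)) = ((a * 256 + pvByte buf i : Nat) : Int) by push_cast; ring]
    exact ih _

theorem pvTestBitMulAdd (a b t : Nat) (hb : b < 256) :
    (a * 256 + b).testBit t = if t < 8 then b.testBit t else a.testBit (t - 8) := by
  rw [show a * 256 + b = (a <<< 8) ||| b from (pvOrDisjoint 8 a b (by norm_num; omega)).symm,
    Nat.testBit_lor, Nat.testBit_shiftLeft]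
  by_cases ht : t < 8
  · simp [ht, show ¬ t ≥ 8 by omega]
  · have h28 : (2:Nat) ^ 8 ≤ 2 ^ t := Nat.pow_le_pow_right (by norm_num) (by omega)
    have hbt : b < 2 ^ t := by norm_num at h28; omega
    simp [ht, show t ≥ 8 by omega, Nat.testBit_eq_false_of_lt hbt]

theorem pvTestBitAcc (l : List Nat) (hl : ∀ b ∈ l, b < 256) (t : Nat) :
    (pvAcc l).testBit t
      = (decide (t < 8 * l.length) && ((l.getD (l.length - 1 - t / 8) 0).testBit (t % 8))) := by
  induction l using List.reverseRecOn generalizing t with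
  | nil => simp [pvAcc, Nat.zero_testBit]
  | append_singleton l b ih =>
    have hb : b < 256 := hl b (by simp)
    have hl' : ∀ x ∈ l, x < 256 := fun x hx => hl x (by simp [hx])
    have hacc : pvAcc (l ++ [b]) = pvAcc l * 256 + b := by
      simp [pvAcc, List.foldl_append]
    rw [hacc, pvTestBitMulAdd _ _ _ hb]
    rw [List.length_append, List.length_singleton]
    by_cases ht : t < 8
    · have h0 : t / 8 = 0 := by omega
      have h1 : l.length + 1 - 1 - 0 = l.length := by omega
      have h2 : t % 8 = t := by omega
      have h3 : (l ++ [b]).getD l.length 0 = b := by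
        rw [List.getD_eq_getElem _ _ (by rw [List.length_append, List.length_singleton]; omega),
          List.getElem_concat_length]
        rfl
      simp only [if_pos ht, h0, h1, h2, h3]
      simp [show t < 8 * (l.length + 1) by omega]
    · rw [if_neg ht, ih hl' (t - 8)]
      by_cases h4 : t < 8 * (l.length + 1)
      · have h5 : t - 8 < 8 * l.length := by omega
        have h6 : (t - 8) / 8 = t / 8 - 1 := by omega
        have h7 : (t - 8) % 8 = t % 8 := by omega
        have h8 : l.length - 1 - (t - 8) / 8 = l.length + 1 - 1 - t / 8 := by omega
        have h9 : l.length + 1 - 1 - t / 8 < l.length := by omega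
        rw [h6, h7, ← h6, h8, List.getD_append _ _ _ _ h9]
        simp [h5, h4]
      · have h5 : ¬ (t - 8 < 8 * l.length) := by omega
        simp [h4, h5]

theorem pvReadB (buf : List Int) (o nb : Int) (h : 0 < nb) :
    read_ub_alt buf o nb
      = (↑(((pvAcc ((PySem.List.pyRange (o / 8) ((o + nb - 1) / 8 + 1) 1).map (pvByte buf)))
              >>> (((o + nb - 1) / 8 + 1) * 8 - (o + nb)).toNat) % 2 ^ nb.toNat), o + nb) := by
  unfold read_ub_alt
  rw [if_neg (by omega)]
  dsimp only
  have h1 : o >>> (3:Nat) = o / 8 := by rw [Int.shiftRight_eq_div_pow]; norm_num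
  have h2 : (o + nb - 1) >>> (3:Nat) = (o + nb - 1) / 8 := by
    rw [Int.shiftRight_eq_div_pow]; norm_num
  rw [h1, h2]
  have hacc : (PySem.List.pyRange (o / 8) ((o + nb - 1) / 8 + 1) 1).foldl
      (fun acc i => PySem.Int.bor (acc <<< (8 : Nat))
        (PySem.Int.band ((PySem.List.pyGet? buf i).getD 0) 255)) ((0:Nat) : Int)
      = ↑(pvAcc ((PySem.List.pyRange (o / 8) ((o + nb - 1) / 8 + 1) 1).map (pvByte buf))) := by
    rw [pvAccCast]
    unfold pvAcc
    rw [List.foldl_map]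
  rw [show (List.foldl (fun acc i => PySem.Int.bor (acc <<< (8:Nat))
        (PySem.Int.band ((PySem.List.pyGet? buf i).getD 0) 255)) (0:Int)
        (PySem.List.pyRange (o / 8) ((o + nb - 1) / 8 + 1) 1))
      = (List.foldl (fun acc i => PySem.Int.bor (acc <<< (8:Nat))
        (PySem.Int.band ((PySem.List.pyGet? buf i).getD 0) 255)) (((0:Nat)):Int)
        (PySem.List.pyRange (o / 8) ((o + nb - 1) / 8 + 1) 1)) by norm_num, hacc]
  set aN := pvAcc ((PySem.List.pyRange (o / 8) ((o + nb - 1) / 8 + 1) 1).map (pvByte buf))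
  set s' := (((o + nb - 1) / 8 + 1) * 8 - (o + nb)).toNat
  have hsh : ((aN : Nat) : Int) >>> s' = ((aN >>> s' : Nat) : Int) := by
    rw [Int.shiftRight_eq_div_pow, ← Int.natCast_ediv, Nat.shiftRight_eq_div_pow]
  have hmask : ((((1:Nat) <<< nb.toNat) : Nat) : Int) - 1 = 2 ^ nb.toNat - 1 := by
    rw [Nat.one_shiftLeft]; push_cast; ring
  rw [hsh, hmask, pvBandMask]
  rw [Prod.mk.injEq]
  refine ⟨?_, rfl⟩
  push_cast
  rfl

theorem pvMain (buf : List Int) (o nb : Int) (h : 0 < nb) :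
    pvValA buf o nb.toNat
      = ((pvAcc ((PySem.List.pyRange (o / 8) ((o + nb - 1) / 8 + 1) 1).map (pvByte buf)))
          >>> (((o + nb - 1) / 8 + 1) * 8 - (o + nb)).toNat) % 2 ^ nb.toNat := by
  set f := o / 8 with hf
  set lst := (o + nb - 1) / 8 with hlst
  set bytes := (PySem.List.pyRange f (lst + 1) 1).map (pvByte buf) with hbytes
  set s' := ((lst + 1) * 8 - (o + nb)).toNat with hs'
  have hlen : bytes.length = ((lst + 1) - f).toNat := by
    rw [hbytes, List.length_map, PySem.List.length_pyRange_one]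
  have hblt : ∀ b ∈ bytes, b < 256 := by
    intro b hb
    rw [hbytes] at hb
    obtain ⟨i, _, rfl⟩ := List.mem_map.mp hb
    exact pvByte_lt buf i
  apply Nat.eq_of_testBit_eq
  intro j
  rw [pvTestBitValA, Nat.testBit_mod_two_pow, Nat.testBit_shiftRight, pvTestBitAcc bytes hblt]
  by_cases hj : j < nb.toNat
  · have ht : s' + j < 8 * bytes.length := by rw [hlen]; omega
    set idx := bytes.length - 1 - (s' + j) / 8 with hidx
    have hidxlt : idx < bytes.length := by omega
    have hget : bytes.getD idx 0 = pvByte buf (f + (idx : Int)) := by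
      rw [List.getD_eq_getElem _ _ hidxlt]
      simp only [hbytes, List.getElem_map]
      congr 1
      rw [PySem.List.getElem_pyRange_one]
    set p : Int := o + ((nb.toNat - 1 - j : Nat) : Int) with hp
    have harg1 : f + (idx : Int) = p / 8 := by omega
    have harg2 : (s' + j) % 8 = (7 - p % 8).toNat := by omega
    rw [hget, harg1, harg2]
    have hbit : pvBit buf p = (pvByte buf (p / 8)).testBit (7 - p % 8).toNat := rfl
    rw [← hbit]
    simp [hj, ht]
  · simp [hj]

-- ===== VERDICT (by name: the statement is the Claim_ definition above) =====
theorem read_ub_spec : Claim_equal_read_ub := by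
  intro buf o nb _ _
  unfold Spec_read_ub
  by_cases h : nb ≤ 0
  · have h0 : nb.toNat = 0 := by omega
    rw [pvReadA, h0]
    simp [read_ub_alt, h, pvValA]
  · have h' : 0 < nb := by omega
    rw [pvReadA, pvReadB buf o nb h', pvMain buf o nb h']
    have hc : (nb.toNat : Int) = nb := by omega
    rw [hc]
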